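-- pv_equiv track=rewrite | github.com/jsw883/minimongo | minimongo/auxiliary.py | sort_list_diff
-- ===== SOURCE A (Python) =====
-- def sort_list_diff(old, new):
--     """Computes shallow difference between two lists (sortable).
--
--     Args:
--         old (list): old list (sortable)
--         new (list): new list (sortable)
--
--     Returns:
--         dict: difference summary
--     """
--
--     old = sorted(old)
--     new = sorted(new)
--
--     deleted = []
--     created = []
--
--     for v in old:
--         if v not in new:
--             deleted.append(v)
--
--     for v in new:
--         if v not in old:
--             created.append(v)
--
--     summary = {}
--     if deleted:
--         summary['deleted'] = deleted
--     if created: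
--         summary['created'] = created
--
--     return summary
-- ===== SOURCE B (Python) =====
-- def sort_list_diff(old, new):
--     """Computes shallow difference between two lists (sortable).
--
--     Single two-pointer merge over the two sorted lists instead of two
--     membership passes.
--     """
--     old = sorted(old)
--     new = sorted(new)
--
--     deleted = []
--     created = []
--
--     i = j = 0
--     n, m = len(old), len(new)
--     while i < n and j < m:
--         if old[i] < new[j]:
--             deleted.append(old[i])
--             i += 1
--         elif new[j] < old[i]:
--             created.append(new[j])
--             j += 1
--         else:
--             v = old[i]
--             while i < n and old[i] == v:
--                 i += 1
--             while j < m and new[j] == v: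
--                 j += 1
--     deleted.extend(old[i:])
--     created.extend(new[j:])
--
--     summary = {}
--     if deleted:
--         summary['deleted'] = deleted
--     if created:
--         summary['created'] = created
--     return summary
-- ===== Notes on version B (the rewrite author's own statement) =====
-- stated objective: faster
-- what changed: Replaces A's two quadratic membership-scan passes over the sorted lists with a single two-pointer merge that emits unmatched elements and skips all duplicates of a matched value on both sides.
import Mathlib
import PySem

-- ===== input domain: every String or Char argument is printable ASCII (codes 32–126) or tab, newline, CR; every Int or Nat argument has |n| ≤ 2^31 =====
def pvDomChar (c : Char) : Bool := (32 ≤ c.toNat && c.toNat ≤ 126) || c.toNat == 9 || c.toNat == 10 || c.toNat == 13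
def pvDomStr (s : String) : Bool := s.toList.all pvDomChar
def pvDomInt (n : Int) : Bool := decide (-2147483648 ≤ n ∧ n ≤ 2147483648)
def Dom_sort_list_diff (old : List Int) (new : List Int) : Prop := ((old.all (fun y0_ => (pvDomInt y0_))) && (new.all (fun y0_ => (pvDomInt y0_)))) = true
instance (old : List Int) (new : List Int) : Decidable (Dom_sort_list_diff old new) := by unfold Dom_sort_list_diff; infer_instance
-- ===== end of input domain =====

-- B replaces A's two quadratic membership passes by one two-pointer merge of the sorted lists (faster: O(n log n) vs O(n^2)).

-- ===== PORT A =====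
def sort_list_diff (old : List Int) (new : List Int) : List (String × List Int) :=
  let old' := PySem.List.sorted old (fun x => x) false
  let new' := PySem.List.sorted new (fun x => x) false
  let deleted := old'.foldl (fun acc v => if new'.contains v then acc else acc ++ [v]) []
  let created := new'.foldl (fun acc v => if old'.contains v then acc else acc ++ [v]) []
  let s1 : List (String × List Int) := if deleted.isEmpty then [] else [("deleted", deleted)]
  if created.isEmpty then s1 else s1 ++ [("created", created)]

-- ===== PORT B =====
-- two-pointer merge: head comparisons; on equality drop every copy of the value on both sides
def mergeDiff : List Int → List Int → List Int × List Int
  | [], ys => ([], ys)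
  | x :: xs, [] => (x :: xs, [])
  | x :: xs, y :: ys =>
    if x < y then
      let r := mergeDiff xs (y :: ys); (x :: r.1, r.2)
    else if y < x then
      let r := mergeDiff (x :: xs) ys; (r.1, y :: r.2)
    else
      mergeDiff (xs.dropWhile (· == x)) (ys.dropWhile (· == x))
termination_by xs ys => xs.length + ys.length
decreasing_by
  all_goals
    (try (have h1 := List.length_dropWhile_le (· == x) xs);
     try (have h2 := List.length_dropWhile_le (· == x) ys);
     simp_all; try omega)

def sort_list_diff_alt (old : List Int) (new : List Int) : List (String × List Int) :=
  let old' := PySem.List.sorted old (fun x => x) false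
  let new' := PySem.List.sorted new (fun x => x) false
  let r := mergeDiff old' new'
  let s1 : List (String × List Int) := if r.1.isEmpty then [] else [("deleted", r.1)]
  if r.2.isEmpty then s1 else s1 ++ [("created", r.2)]

-- ===== PRECONDITION & SPEC =====
def Spec_sort_list_diff (old : List Int) (new : List Int) (out : List (String × List Int)) : Prop := out = sort_list_diff_alt old new
instance (old : List Int) (new : List Int) (out : List (String × List Int)) : Decidable (Spec_sort_list_diff old new out) := by unfold Spec_sort_list_diff; infer_instance

-- ===== CLAIM (what is proved, stated in full; the proofs are below) =====
def Claim_equal_sort_list_diff : Prop := ∀ (old : List Int) (new : List Int), Dom_sort_list_diff old new → Spec_sort_list_diff old new (sort_list_diff old new)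

-- ===== LEMMAS AND PROOFS =====

lemma foldl_notmem (ys : List Int) : ∀ (l acc : List Int),
    l.foldl (fun acc v => if ys.contains v then acc else acc ++ [v]) acc
      = acc ++ l.filter (fun v => !(ys.contains v)) := by
  intro l
  induction l with
  | nil => simp [List.foldl]
  | cons x t ih =>
    intro acc
    by_cases h : ys.contains x = true
    · have hm : x ∈ ys := by simpa using h
      rw [List.foldl_cons, if_pos h, ih]
      simp [hm]
    · have hm : x ∉ ys := by simpa using h
      rw [List.foldl_cons, if_neg h, ih]
      simp [hm]

-- in a sorted list bounded below by x, everything after the prefix of x's is > x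
lemma sorted_dropWhile_gt (x : Int) : ∀ (l : List Int), l.Pairwise (· ≤ ·) →
    (∀ v ∈ l, x ≤ v) → ∀ v ∈ l.dropWhile (· == x), x < v := by
  intro l
  induction l with
  | nil => simp
  | cons a t ih =>
    intro hp hlb v hv
    rcases List.pairwise_cons.mp hp with ⟨ha, ht⟩
    by_cases hax : a = x
    · rw [List.dropWhile_cons_of_pos (by simp [hax])] at hv
      exact ih ht (fun w hw => le_trans (hlb a (by simp)) (ha w hw)) v hv
    · rw [List.dropWhile_cons_of_neg (by simpa using hax)] at hv
      have hxa : x < a := lt_of_le_of_ne (hlb a (by simp)) (fun h => hax h.symm)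
      rcases List.mem_cons.mp hv with h | h
      · exact h ▸ hxa
      · exact lt_of_lt_of_le hxa (ha v h)

lemma mem_takeWhile_eq (x : Int) (l : List Int) : ∀ v ∈ l.takeWhile (· == x), v = x := by
  intro v hv
  have := List.takeWhile_prefix (p := (· == x)) (l := l)
  have h := List.mem_takeWhile_imp hv
  simpa using h

-- membership in ys is unchanged by dropping the prefix of x's, for v ≠ x
lemma contains_dropWhile (x : Int) (l : List Int) (v : Int) (hvx : v ≠ x) :
    l.contains v = (l.dropWhile (· == x)).contains v := by
  have hno : (l.takeWhile (· == x)).contains v = false := by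
    simp only [List.contains_eq_mem, decide_eq_false_iff_not]
    intro hmem
    exact hvx (mem_takeWhile_eq x l v hmem)
  have hsplit : l.contains v = ((l.takeWhile (· == x)) ++ l.dropWhile (· == x)).contains v := by
    rw [List.takeWhile_append_dropWhile]
  rw [hsplit, List.contains_append, hno, Bool.false_or]

-- dropping a head smaller than every element of l does not change l's filter
lemma filter_head_lt (y : Int) (l ys : List Int) (hgt : ∀ v ∈ l, y < v) :
    l.filter (fun v => !((y :: ys).contains v)) = l.filter (fun v => !(ys.contains v)) := by
  apply List.filter_congr
  intro v hv
  have : v ≠ y := ne_of_gt (hgt v hv)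
  simp [this]

-- the equal-heads case: dropping x and every duplicate of it on both sides preserves the filter
lemma filter_drop_eq (x : Int) (xs ys : List Int)
    (hxt : xs.Pairwise (· ≤ ·)) (hxall : ∀ v ∈ xs, x ≤ v) (hyt : ys.Pairwise (· ≤ ·))
    (hyall : ∀ v ∈ ys, x ≤ v) :
    (x :: xs).filter (fun v => !((x :: ys).contains v))
      = (xs.dropWhile (· == x)).filter (fun v => !((ys.dropWhile (· == x)).contains v)) := by
  have hdx := sorted_dropWhile_gt x xs hxt hxall
  have hhead : (!((x :: ys).contains x)) = false := by simp
  rw [List.filter_cons, hhead]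
  simp only [Bool.false_eq_true, if_false]
  have hsplit : xs.filter (fun v => !((x :: ys).contains v))
      = (xs.takeWhile (· == x)).filter (fun v => !((x :: ys).contains v))
        ++ (xs.dropWhile (· == x)).filter (fun v => !((x :: ys).contains v)) := by
    rw [← List.filter_append, List.takeWhile_append_dropWhile]
  have htw : (xs.takeWhile (· == x)).filter (fun v => !((x :: ys).contains v)) = [] := by
    rw [List.filter_eq_nil_iff]
    intro v hv
    have : v = x := mem_takeWhile_eq x xs v hv
    simp [this]
  rw [hsplit, htw, List.nil_append]
  apply List.filter_congr
  intro v hv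
  have hvx : v ≠ x := ne_of_gt (hdx v hv)
  have hmem : (v ∈ ys) ↔ (v ∈ ys.dropWhile (· == x)) := by
    simpa using contains_dropWhile x ys v hvx
  simp [hvx, hmem]

lemma mergeDiff_eq : ∀ (xs ys : List Int), xs.Pairwise (· ≤ ·) → ys.Pairwise (· ≤ ·) →
    mergeDiff xs ys = (xs.filter (fun v => !(ys.contains v)), ys.filter (fun v => !(xs.contains v))) := by
  intro xs ys
  induction xs, ys using mergeDiff.induct with
  | case1 ys => intro _ _; simp [mergeDiff]
  | case2 x xs => intro _ _; simp [mergeDiff]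
  | case3 x xs y ys hlt ih =>
    intro hx hy
    rcases List.pairwise_cons.mp hx with ⟨hxall, hxt⟩
    rcases List.pairwise_cons.mp hy with ⟨hyall, hyt⟩
    have hnotin : (!((y :: ys).contains x)) = true := by
      simp only [List.contains_cons, Bool.not_eq_eq_eq_not, Bool.not_true, Bool.or_eq_false_iff]
      constructor
      · simpa using (ne_of_lt hlt)
      · simp only [List.contains_eq_mem, decide_eq_false_iff_not]
        intro hmem
        exact absurd (lt_of_lt_of_le hlt (hyall x hmem)) (lt_irrefl _)
    have hfc : (y :: ys).filter (fun v => !((x :: xs).contains v))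
             = (y :: ys).filter (fun v => !(xs.contains v)) := by
      apply filter_head_lt
      intro v hv
      rcases List.mem_cons.mp hv with h | h
      · exact h ▸ hlt
      · exact lt_of_lt_of_le hlt (hyall v h)
    rw [mergeDiff, if_pos hlt, ih hxt hy, hfc]
    simp [List.filter_cons, hnotin]
    exact ⟨ne_of_lt hlt, fun hmem => absurd (lt_of_lt_of_le hlt (hyall x hmem)) (lt_irrefl _)⟩
  | case4 x xs y ys hnlt hlt ih =>
    intro hx hy
    rcases List.pairwise_cons.mp hx with ⟨hxall, hxt⟩
    rcases List.pairwise_cons.mp hy with ⟨hyall, hyt⟩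
    have hnotin : (!((x :: xs).contains y)) = true := by
      simp only [List.contains_cons, Bool.not_eq_eq_eq_not, Bool.not_true, Bool.or_eq_false_iff]
      constructor
      · simpa using (ne_of_lt hlt)
      · simp only [List.contains_eq_mem, decide_eq_false_iff_not]
        intro hmem
        exact absurd (lt_of_lt_of_le hlt (hxall y hmem)) (lt_irrefl _)
    have hfc : (x :: xs).filter (fun v => !((y :: ys).contains v))
             = (x :: xs).filter (fun v => !(ys.contains v)) := by
      apply filter_head_lt
      intro v hv
      rcases List.mem_cons.mp hv with h | h
      · exact h ▸ hlt
      · exact lt_of_lt_of_le hlt (hxall v h)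
    rw [mergeDiff, if_neg hnlt, if_pos hlt, ih hx hyt, hfc]
    simp [List.filter_cons, hnotin]
    exact ⟨ne_of_lt hlt, fun hmem => absurd (lt_of_lt_of_le hlt (hxall y hmem)) (lt_irrefl _)⟩
  | case5 x xs y ys hnlt1 hnlt2 ih =>
    intro hx hy
    have hxy : x = y := le_antisymm (not_lt.mp hnlt2) (not_lt.mp hnlt1)
    subst hxy
    rcases List.pairwise_cons.mp hx with ⟨hxall, hxt⟩
    rcases List.pairwise_cons.mp hy with ⟨hyall, hyt⟩
    have hdxs : (xs.dropWhile (· == x)).Pairwise (· ≤ ·) :=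
      List.Pairwise.sublist (List.dropWhile_sublist _) hxt
    have hdys : (ys.dropWhile (· == x)).Pairwise (· ≤ ·) :=
      List.Pairwise.sublist (List.dropWhile_sublist _) hyt
    have hdel := filter_drop_eq x xs ys hxt hxall hyt hyall
    have hcre := filter_drop_eq x ys xs hyt hyall hxt hxall
    rw [mergeDiff, if_neg hnlt1, if_neg hnlt2, ih hdxs hdys, ← hdel, ← hcre]

-- ===== VERDICT (by name: the statement is the Claim_ definition above) =====
theorem sort_list_diff_spec : Claim_equal_sort_list_diff := by
  intro old new _
  unfold Spec_sort_list_diff sort_list_diff sort_list_diff_alt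
  have hso : (PySem.List.sorted old (fun x => x) false).Pairwise (· ≤ ·) := by
    simpa using PySem.List.sorted_pairwise (xs := old) (key := fun x => x)
  have hsn : (PySem.List.sorted new (fun x => x) false).Pairwise (· ≤ ·) := by
    simpa using PySem.List.sorted_pairwise (xs := new) (key := fun x => x)
  simp only [foldl_notmem, List.nil_append, mergeDiff_eq _ _ hso hsn]
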